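-- pv_equiv track=rewrite | github.com/madewiththis/fa-tickets | backend/app/services/emailer.py | build_ticket_lines
-- ===== SOURCE A (Python) =====
-- from typing import Iterable, Optional
--
-- def build_ticket_lines(items: Iterable[tuple[str, int, int]]) -> tuple[str, str, int]:
--     """Return (lines, total_thb_str, count) from (name, qty, price) tuples."""
--     total = 0
--     count = 0
--     lines: list[str] = []
--     for name, qty, price in items:
--         lines.append(f"{qty} x {name} — {price} THB each")
--         total += qty * (price or 0)
--         count += qty
--     return "\n".join(lines), f"{total} THB", count
-- ===== SOURCE B (Python) =====
-- def _solve(xs):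
--     # xs is a nonempty list of (name, qty, price); returns (lines, total, count)
--     if len(xs) == 1:
--         name, qty, price = xs[0]
--         return (f"{qty} x {name} — {price} THB each", qty * (price or 0), qty)
--     mid = len(xs) // 2
--     l = _solve(xs[:mid])
--     r = _solve(xs[mid:])
--     return (l[0] + "\n" + r[0], l[1] + r[1], l[2] + r[2])
--
-- def build_ticket_lines(items):
--     items = list(items)
--     if not items:
--         return ("", "0 THB", 0)
--     lines, total, count = _solve(items)
--     return (lines, f"{total} THB", count)
-- ===== Notes on version B (the rewrite author's own statement) =====
-- stated objective: alternative
-- what changed: Replaced A's single left-to-right accumulation loop with a divide-and-conquer recursion that splits the item list in half, solves each half, and merges the (lines, total, count) triples, joining the two line blocks with a newline.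
import Mathlib
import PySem

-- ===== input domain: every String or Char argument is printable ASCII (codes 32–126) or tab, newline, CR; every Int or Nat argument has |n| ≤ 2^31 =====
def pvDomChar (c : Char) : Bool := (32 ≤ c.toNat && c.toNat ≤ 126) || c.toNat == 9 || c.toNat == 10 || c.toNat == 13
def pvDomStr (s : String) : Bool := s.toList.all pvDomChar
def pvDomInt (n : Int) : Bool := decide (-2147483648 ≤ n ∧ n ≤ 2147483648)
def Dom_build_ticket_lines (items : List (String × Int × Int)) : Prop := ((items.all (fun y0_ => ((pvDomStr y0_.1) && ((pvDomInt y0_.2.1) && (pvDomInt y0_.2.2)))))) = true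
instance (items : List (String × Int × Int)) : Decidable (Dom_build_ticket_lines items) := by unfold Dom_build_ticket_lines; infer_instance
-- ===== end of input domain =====

-- B replaces A's single fused accumulation loop by a divide-and-conquer recursion that
-- splits the list in half and merges the (lines, total, count) triples; objective: alternative.

-- shared rendering of one f-string line (both Pythons use the identical f-string)
def pvLine (name : String) (qty price : Int) : List Char :=
  PySem.Int.toChars qty ++ " x ".toList ++ name.toList ++ " — ".toList ++
    PySem.Int.toChars price ++ " THB each".toList

-- ===== PORT A =====
-- the single loop over items carrying (total, count, lines)
def pvFoldA (items : List (String × Int × Int)) (st : Int × Int × List (List Char)) :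
    Int × Int × List (List Char) :=
  items.foldl (fun st it =>
    (st.1 + it.2.1 * (if it.2.2 == 0 then 0 else it.2.2),   -- total += qty * (price or 0)
     st.2.1 + it.2.1,                                        -- count += qty
     st.2.2 ++ [pvLine it.1 it.2.1 it.2.2])) st              -- lines.append(f"...")

def build_ticket_lines (items : List (String × Int × Int)) : String × String × Int :=
  let r := pvFoldA items (0, 0, [])
  (String.mk (PySem.Chars.join "\n".toList r.2.2),
   String.mk (PySem.Int.toChars r.1 ++ " THB".toList),
   r.2.1)

-- ===== PORT B =====
-- arithmetic fact used by pvSolve's termination proof (Python's // on a nonnegative length)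
theorem pvHalf (k : ℕ) : (PySem.Int.floordiv (Int.ofNat k) 2).toNat = k / 2 := by
  simp [PySem.Int.floordiv, Int.fdiv_eq_ediv]
  omega

-- _solve: divide-and-conquer on a nonempty slice; the [] case is unreachable in B
-- (it only calls _solve on nonempty lists) and is supplied here only for totality.
def pvSolve : List (String × Int × Int) → List Char × Int × Int
  | [] => ([], 0, 0)
  | x :: rest =>
    if rest.length == 0 then          -- len(xs) == 1
      (pvLine x.1 x.2.1 x.2.2, x.2.1 * (if x.2.2 == 0 then 0 else x.2.2), x.2.1)
    else
      let xs := x :: rest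
      let mid := PySem.Int.floordiv (Int.ofNat xs.length) 2   -- mid = len(xs) // 2
      let l := pvSolve (xs.take mid.toNat)          -- _solve(xs[:mid])
      let r := pvSolve (xs.drop mid.toNat)          -- _solve(xs[mid:])
      (l.1 ++ '\n' :: r.1, l.2.1 + r.2.1, l.2.2 + r.2.2)
termination_by xs => xs.length
decreasing_by
  · simp only [List.length_take, List.length_cons, pvHalf]
    omega
  · simp only [List.length_drop, List.length_cons, pvHalf]
    have : rest.length ≠ 0 := by simpa using ‹¬ (rest.length == 0) = true›
    omega

def build_ticket_lines_alt (items : List (String × Int × Int)) : String × String × Int :=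
  match items with
  | [] => ("", "0 THB", 0)
  | _ :: _ =>
    let r := pvSolve items
    (String.mk r.1, String.mk (PySem.Int.toChars r.2.1 ++ " THB".toList), r.2.2)

-- ===== PRECONDITION & SPEC =====
def Spec_build_ticket_lines (items : List (String × Int × Int)) (out : String × String × Int) : Prop := out = build_ticket_lines_alt items
instance (items : List (String × Int × Int)) (out : String × String × Int) : Decidable (Spec_build_ticket_lines items out) := by unfold Spec_build_ticket_lines; infer_instance

-- ===== CLAIM (what is proved, stated in full; the proofs are below) =====
def Claim_equal_build_ticket_lines : Prop := ∀ (items : List (String × Int × Int)), Dom_build_ticket_lines items → Spec_build_ticket_lines items (build_ticket_lines items)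

-- ===== LEMMAS AND PROOFS =====

-- proof-only accumulators: what A's fused loop computes in its first two components
def pvTotal (items : List (String × Int × Int)) : Int :=
  items.foldl (fun acc it => acc + it.2.1 * (if it.2.2 == 0 then 0 else it.2.2)) 0

def pvCount (items : List (String × Int × Int)) : Int :=
  items.foldl (fun acc it => acc + it.2.1) 0

theorem foldl_add_shift (f : (String × Int × Int) → Int) :
    ∀ (xs : List (String × Int × Int)) (a : Int),
      xs.foldl (fun acc it => acc + f it) a = a + xs.foldl (fun acc it => acc + f it) 0 := by
  intro xs
  induction xs with
  | nil => intro a; simp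
  | cons x xs ih =>
      intro a
      simp only [List.foldl_cons]
      rw [ih (a + f x), ih (0 + f x)]
      ring

theorem pvFoldA_split :
    ∀ (items : List (String × Int × Int)) (t c : Int) (ls : List (List Char)),
      pvFoldA items (t, c, ls) =
        (t + pvTotal items, c + pvCount items,
         ls ++ items.map (fun it => pvLine it.1 it.2.1 it.2.2)) := by
  intro items
  induction items with
  | nil => intro t c ls; simp [pvFoldA, pvTotal, pvCount]
  | cons x xs ih =>
      intro t c ls
      simp only [pvFoldA, List.foldl_cons] at *
      rw [ih]
      simp only [pvTotal, pvCount, List.foldl_cons, List.map_cons]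
      rw [foldl_add_shift (fun it => it.2.1 * (if it.2.2 == 0 then 0 else it.2.2)) xs
            (0 + x.2.1 * (if x.2.2 == 0 then 0 else x.2.2)),
          foldl_add_shift (fun it => it.2.1) xs (0 + x.2.1)]
      simp only [Prod.mk.injEq]
      refine ⟨by ring, by ring, by simp⟩

theorem pvTotal_append (a b : List (String × Int × Int)) :
    pvTotal (a ++ b) = pvTotal a + pvTotal b := by
  simp only [pvTotal, List.foldl_append]
  rw [foldl_add_shift]

theorem pvCount_append (a b : List (String × Int × Int)) :
    pvCount (a ++ b) = pvCount a + pvCount b := by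
  simp only [pvCount, List.foldl_append]
  rw [foldl_add_shift]

theorem join_append (sep : List Char) :
    ∀ (l1 l2 : List (List Char)), l1 ≠ [] → l2 ≠ [] →
      PySem.Chars.join sep (l1 ++ l2) =
        PySem.Chars.join sep l1 ++ sep ++ PySem.Chars.join sep l2 := by
  intro l1
  induction l1 with
  | nil => intro l2 h _; exact absurd rfl h
  | cons p l1 ih =>
      intro l2 _ hl2
      cases l1 with
      | nil =>
          cases l2 with
          | nil => exact absurd rfl hl2
          | cons q l2 =>
              rw [List.singleton_append, PySem.Chars.join_cons_cons,
                  PySem.Chars.join_singleton]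
      | cons q l1 =>
          have hrec := ih l2 (by simp) hl2
          have e1 : (p :: q :: l1) ++ l2 = p :: q :: (l1 ++ l2) := rfl
          rw [e1, PySem.Chars.join_cons_cons,
              show q :: (l1 ++ l2) = (q :: l1) ++ l2 from rfl, hrec,
              PySem.Chars.join_cons_cons]
          simp [List.append_assoc]

theorem pvSolve_correct :
    ∀ (n : ℕ) (xs : List (String × Int × Int)), xs.length = n → xs ≠ [] →
      pvSolve xs =
        (PySem.Chars.join ['\n'] (xs.map fun it => pvLine it.1 it.2.1 it.2.2),
         pvTotal xs, pvCount xs) := by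
  intro n
  induction n using Nat.strong_induction_on with
  | _ n ih =>
    intro xs hn hne
    match xs, hne with
    | x :: rest, _ =>
      by_cases hone : rest.length = 0
      · have : rest = [] := by simpa using hone
        subst this
        simp [pvSolve, PySem.Chars.join_singleton, pvTotal, pvCount]
      · rw [pvSolve]
        simp only [if_neg (show ¬(rest.length == 0) = true by simpa using hone), pvHalf,
          List.length_cons]
        have hr0 : rest.length ≠ 0 := by simpa using hone
        have hn' : rest.length + 1 = n := by simpa using hn
        have htake : ((x :: rest).take ((rest.length + 1) / 2)) ≠ [] := by
          simp only [ne_eq, List.take_eq_nil_iff, not_or]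
          exact ⟨by omega, by simp⟩
        have hdrop : ((x :: rest).drop ((rest.length + 1) / 2)) ≠ [] := by
          simp [List.drop_eq_nil_iff]; omega
        have hl := ih ((x :: rest).take ((rest.length + 1) / 2)).length
          (by simp [List.length_take, List.length_cons]; omega) _ rfl htake
        have hr := ih ((x :: rest).drop ((rest.length + 1) / 2)).length
          (by simp [List.length_drop, List.length_cons]; omega) _ rfl hdrop
        rw [hl, hr]
        conv_rhs => rw [show (x :: rest) =
          (x :: rest).take ((rest.length + 1) / 2) ++ (x :: rest).drop ((rest.length + 1) / 2) by simp]
        rw [List.map_append,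
            join_append ['\n'] _ _ (by simpa using htake) (by simpa using hdrop),
            pvTotal_append, pvCount_append]
        simp

-- ===== VERDICT (by name: the statement is the Claim_ definition above) =====
theorem build_ticket_lines_spec : Claim_equal_build_ticket_lines := by
  intro items _
  show build_ticket_lines items = build_ticket_lines_alt items
  cases items with
  | nil => decide
  | cons x rest =>
      simp only [build_ticket_lines, build_ticket_lines_alt, pvFoldA_split,
        pvSolve_correct (x :: rest).length (x :: rest) rfl (by simp)]
      simp [show "\n".toList = ['\n'] from by decide]
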